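-- pv_equiv track=rewrite | github.com/IndiumSoftware-AppEngineering/Documnent-freshness-auditor-agent | src/document_freshness_auditor/db.py | _extract_issue_text
-- ===== SOURCE A (Python) =====
-- def _extract_issue_text(iss):
--     """Extract the issue description from a dict, trying many possible key names."""
--     if not isinstance(iss, dict):
--         return str(iss) if iss else ""
--     for key in (
--         "issue_name", "description", "issue", "problem", "finding", "title",
--         "message", "detail", "text", "name", "summary", "msg",
--     ):
--         val = iss.get(key)
--         if val and isinstance(val, str) and val.strip():
--             return val.strip()
--     # fallback: join all string values in the dict
--     parts = [str(v) for v in iss.values() if isinstance(v, str) and v.strip()]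
--     return "; ".join(parts) if parts else str(iss)
-- ===== SOURCE B (Python) =====
-- _PRIORITY = (
--     "issue_name", "description", "issue", "problem", "finding", "title",
--     "message", "detail", "text", "name", "summary", "msg",
-- )
--
-- def _extract_issue_text(iss):
--     """Extract the issue description from a dict, trying many possible key names."""
--     if not isinstance(iss, dict):
--         return str(iss) if iss else ""
--     rank = {k: i for i, k in enumerate(_PRIORITY)}
--     best = None
--     texts = []
--     for k, v in iss.items():
--         if isinstance(v, str) and v.strip():
--             texts.append(v)
--             r = rank.get(k)
--             if r is not None and (best is None or r < best[0]):
--                 best = (r, v)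
--     if best is not None:
--         return best[1].strip()
--     return "; ".join(texts) if texts else str(iss)
-- ===== Notes on version B (the rewrite author's own statement) =====
-- stated objective: alternative
-- what changed: A probes the dict with twelve ordered .get calls and returns at the first hit; B builds a key->priority rank map once and makes a single pass over the items, keeping the candidate of strictly minimal rank, with the same fallback join/str(dict).
import Mathlib
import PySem

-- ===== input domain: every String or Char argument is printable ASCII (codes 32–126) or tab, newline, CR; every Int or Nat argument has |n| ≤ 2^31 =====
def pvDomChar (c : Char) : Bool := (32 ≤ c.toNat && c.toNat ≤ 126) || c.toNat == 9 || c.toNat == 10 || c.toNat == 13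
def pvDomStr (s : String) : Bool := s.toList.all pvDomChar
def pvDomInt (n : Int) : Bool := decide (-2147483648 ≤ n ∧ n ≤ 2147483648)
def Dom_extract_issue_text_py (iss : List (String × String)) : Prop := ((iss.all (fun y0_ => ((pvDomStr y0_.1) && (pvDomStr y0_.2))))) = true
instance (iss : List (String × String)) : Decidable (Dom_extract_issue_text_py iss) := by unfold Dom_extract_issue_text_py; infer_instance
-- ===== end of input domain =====

-- B replaces A's priority loop of twelve dict.get probes by one pass over the items that
-- tracks the candidate of minimal priority rank (objective: alternative, not faster).
-- Both Pythons share the fallback lines verbatim; the type fixes iss to dict[str, str],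
-- so A's `isinstance` guard and its `str(iss) if iss else ""` branch are dead code here.

-- ===== PORT A =====
-- shared helpers (code both Pythons contain verbatim): the priority tuple, str(dict) and the fallback join
def pvKEYS : List String :=
  ["issue_name", "description", "issue", "problem", "finding", "title",
   "message", "detail", "text", "name", "summary", "msg"]

-- str(iss) for a dict of strings = Python's repr; exact on the Dom alphabet
-- (printable ASCII plus tab/newline/CR: those three are escaped, backslash and the
-- chosen quote are escaped, every other character appears verbatim).
def pvReprChar (q c : Char) : List Char :=
  if c = '\\' then ['\\', '\\']
  else if c = q then ['\\', q]
  else if c = '\t' then ['\\', 't']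
  else if c = '\n' then ['\\', 'n']
  else if c = '\r' then ['\\', 'r']
  else [c]

-- Python picks double quotes iff the string contains ' and no "
def pvReprStr (s : String) : List Char :=
  let cs := s.toList
  let q := if '\'' ∈ cs ∧ '"' ∉ cs then '"' else '\''
  q :: cs.flatMap (pvReprChar q) ++ [q]

def pvReprItems : List (String × String) → List Char
  | [] => []
  | [p] => pvReprStr p.1 ++ ':' :: ' ' :: pvReprStr p.2
  | p :: q :: rest => pvReprStr p.1 ++ ':' :: ' ' :: pvReprStr p.2 ++ ',' :: ' ' :: pvReprItems (q :: rest)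

def pvStrOfDict (iss : List (String × String)) : String :=
  String.ofList ('{' :: (pvReprItems iss ++ ['}']))

-- parts = [str(v) for v in iss.values() if isinstance(v, str) and v.strip()]
-- return "; ".join(parts) if parts else str(iss)
def pvFallback (iss : List (String × String)) : String :=
  let parts := (iss.map Prod.snd).filter (fun v => PySem.Str.strip v != "")
  if parts ≠ [] then PySem.Str.join "; " parts else pvStrOfDict iss

-- A's for-loop over the candidate keys: val = iss.get(key); if val and … and val.strip(): return val.strip()
def pvALoop (iss : List (String × String)) : List String → Option String
  | [] => none
  | k :: ks =>
    match PySem.Dict.get? (PySem.Dict.mk iss) k with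
    | some val =>
      if val != "" && PySem.Str.strip val != "" then some (PySem.Str.strip val)
      else pvALoop iss ks
    | none => pvALoop iss ks

def extract_issue_text_py (iss : List (String × String)) : String :=
  match pvALoop iss pvKEYS with
  | some t => t
  | none => pvFallback iss

-- ===== PORT B =====
-- rank = {k: i for i, k in enumerate(_PRIORITY)}
def pvRank : PySem.Dict String Int :=
  (PySem.List.enumerate pvKEYS 0).foldl (fun d p => d.insert p.2 p.1) PySem.Dict.empty

-- loop body: if v.strip(): texts.append(v); r = rank.get(k);
--             if r is not None and (best is None or r < best[0]): best = (r, v)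
def pvBStep (st : Option (Int × String) × List String) (p : String × String) :
    Option (Int × String) × List String :=
  if PySem.Str.strip p.2 != "" then
    let texts := st.2 ++ [p.2]
    match PySem.Dict.get? pvRank p.1 with
    | some r =>
      match st.1 with
      | none => (some (r, p.2), texts)
      | some b => if r < b.1 then (some (r, p.2), texts) else (st.1, texts)
    | none => (st.1, texts)
  else st

def extract_issue_text_py_alt (iss : List (String × String)) : String :=
  let st := iss.foldl pvBStep (none, [])
  match st.1 with
  | some b => PySem.Str.strip b.2
  | none => if st.2 ≠ [] then PySem.Str.join "; " st.2 else pvStrOfDict iss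

-- ===== PRECONDITION & SPEC =====
-- Pre_ excludes association lists with duplicate keys: those do not encode any Python
-- dict (dict construction collapses duplicates), so A is never run on them.
def Pre_extract_issue_text_py (iss : List (String × String)) : Prop :=
  (iss.map Prod.fst).Nodup
instance (iss : List (String × String)) : Decidable (Pre_extract_issue_text_py iss) := by
  unfold Pre_extract_issue_text_py; infer_instance

def pvWitness_extract_issue_text_py : (List (String × String)) :=
  [("severity", "high"), ("issue", "  stale link  "), ("title", "t")]

def Spec_extract_issue_text_py (iss : List (String × String)) (out : String) : Prop := out = extract_issue_text_py_alt iss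
instance (iss : List (String × String)) (out : String) : Decidable (Spec_extract_issue_text_py iss out) := by unfold Spec_extract_issue_text_py; infer_instance

-- ===== CLAIM (what is proved, stated in full; the proofs are below) =====
def Claim_equal_extract_issue_text_py : Prop := ∀ (iss : List (String × String)), Dom_extract_issue_text_py iss → Pre_extract_issue_text_py iss → Spec_extract_issue_text_py iss (extract_issue_text_py iss)

-- ===== LEMMAS AND PROOFS =====

-- the rank lookup that assigning index i of the key list ks the rank s + i realises
def pvRk (ks : List String) (s : Int) (k : String) : Option Int :=
  (PySem.List.index? ks k).map (fun i => s + (i : Int))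

-- B's step with the rank lookup abstracted
def pvGStep (r : String → Option Int) (best : Option (Int × String)) (p : String × String) :
    Option (Int × String) :=
  if PySem.Str.strip p.2 != "" then
    match r p.1 with
    | some rr =>
      match best with
      | none => some (rr, p.2)
      | some b => if rr < b.1 then some (rr, p.2) else best
    | none => best
  else best

lemma pvRank_items :
    pvRank = PySem.Dict.mk ((PySem.List.enumerate pvKEYS 0).map (fun p => (p.2, p.1))) := by
  decide

lemma get?_mk_swap_enum (ks : List String) (s : Int) (k : String) :
    PySem.Dict.get? (PySem.Dict.mk ((PySem.List.enumerate ks s).map (fun p => (p.2, p.1)))) k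
      = pvRk ks s k := by
  induction ks generalizing s with
  | nil => simp [pvRk, PySem.List.enumerate, PySem.Dict.get?, PySem.List.index?]
  | cons k0 ks ih =>
    rw [PySem.List.enumerate_cons]
    by_cases hk : k0 = k
    · subst hk
      unfold pvRk
      rw [PySem.List.index?_cons_self]
      simp [PySem.Dict.get?_mk_cons]
    · rw [List.map_cons, PySem.Dict.get?_mk_cons]
      simp only [beq_iff_eq, hk, if_false]
      rw [ih (s + 1)]
      unfold pvRk
      rw [PySem.List.index?_cons_of_ne ks hk]
      cases PySem.List.index? ks k with
      | none => rfl
      | some i => simp [Option.map]; ring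

lemma pvRank_get (k : String) : PySem.Dict.get? pvRank k = pvRk pvKEYS 0 k := by
  rw [pvRank_items, get?_mk_swap_enum]

-- A's truthiness test `val and val.strip()` is just `val.strip() != ""`
lemma pvPass_eq (v : String) :
    (v != "" && (PySem.Str.strip v != "")) = (PySem.Str.strip v != "") := by
  by_cases h : v = ""
  · subst h; rfl
  · simp [bne, h]

lemma pvGStep_skip (r : String → Option Int) (acc : Option (Int × String))
    (p : String × String) (h : PySem.Str.strip p.2 = "") : pvGStep r acc p = acc := by
  simp [pvGStep, h]

lemma pvGStep_norank (r : String → Option Int) (acc : Option (Int × String))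
    (p : String × String) (h : r p.1 = none) : pvGStep r acc p = acc := by
  unfold pvGStep
  rw [h]
  split <;> rfl

lemma pvGStep_congr (r r' : String → Option Int) (acc : Option (Int × String))
    (p : String × String) (h : r p.1 = r' p.1) : pvGStep r acc p = pvGStep r' acc p := by
  unfold pvGStep; rw [h]

-- B's fold splits: the first component is the abstract rank-min fold, the second
-- collects exactly the passing values in order
lemma pvBStep_split (l : List (String × String)) :
    ∀ (b : Option (Int × String)) (t : List String),
      l.foldl pvBStep (b, t)
        = (l.foldl (pvGStep (fun k => PySem.Dict.get? pvRank k)) b,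
           t ++ (l.map Prod.snd).filter (fun v => PySem.Str.strip v != "")) := by
  induction l with
  | nil => intro b t; simp
  | cons p l ih =>
    intro b t
    rw [List.foldl_cons, List.foldl_cons]
    by_cases hstrip : (PySem.Str.strip p.2 != "") = true
    · have hstep : pvBStep (b, t) p
          = (pvGStep (fun k => PySem.Dict.get? pvRank k) b p, t ++ [p.2]) := by
        unfold pvBStep pvGStep
        rw [if_pos hstrip, if_pos hstrip]
        cases hg : PySem.Dict.get? pvRank p.1 with
        | none => simp [hg]
        | some r =>
          simp only [hg]
          cases b with
          | none => rfl
          | some b0 => by_cases hr : r < b0.1 <;> simp [hr]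
      rw [hstep, ih]
      simp [hstrip]
    · have hs : PySem.Str.strip p.2 = "" := by simpa using hstrip
      rw [show pvBStep (b, t) p = (b, t) by unfold pvBStep; rw [if_neg hstrip],
          pvGStep_skip _ _ _ hs, ih]
      simp [hs]

lemma pvALoop_cons_none (iss : List (String × String)) (k : String) (ks : List String)
    (h : PySem.Dict.get? (PySem.Dict.mk iss) k = none) :
    pvALoop iss (k :: ks) = pvALoop iss ks := by
  conv_lhs => unfold pvALoop
  rw [h]

lemma pvALoop_cons_some (iss : List (String × String)) (k : String) (ks : List String)
    (v : String) (h : PySem.Dict.get? (PySem.Dict.mk iss) k = some v) :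
    pvALoop iss (k :: ks)
      = if v != "" && PySem.Str.strip v != "" then some (PySem.Str.strip v)
        else pvALoop iss ks := by
  conv_lhs => unfold pvALoop
  rw [h]

lemma pvRk_cons_ne (k0 : String) (ks : List String) (s : Int) (k : String) (h : k0 ≠ k) :
    pvRk (k0 :: ks) s k = pvRk ks (s + 1) k := by
  unfold pvRk
  rw [PySem.List.index?_cons_of_ne ks h]
  cases PySem.List.index? ks k with
  | none => rfl
  | some i => simp [Option.map]; ring

-- once the strict minimum (s, v) is reached the fold keeps it, and it is reached
lemma pvReach (r : String → Option Int) (k : String) (v : String) (s : Int)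
    (hrk : r k = some s)
    (hgt : ∀ k' x, k' ≠ k → r k' = some x → s < x)
    (hpass : (PySem.Str.strip v != "") = true) :
    ∀ (l : List (String × String)) (acc : Option (Int × String)),
      (∀ p ∈ l, p.1 = k → p.2 = v) →
      (acc = some (s, v) ∨ ((k, v) ∈ l ∧ (acc = none ∨ ∃ b, acc = some b ∧ s < b.1))) →
      l.foldl (pvGStep r) acc = some (s, v) := by
  intro l
  induction l with
  | nil =>
    intro acc _ hinv
    rcases hinv with h | ⟨hmem, _⟩
    · simpa using h
    · simp at hmem
  | cons p l ih =>
    intro acc huniq hinv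
    rw [List.foldl_cons]
    apply ih
    · intro q hq hqk; exact huniq q (List.mem_cons_of_mem p hq) hqk
    · rcases hinv with hacc | ⟨hmem, hhigh⟩
      · -- acc is already the minimum; the step keeps it
        subst hacc
        left
        unfold pvGStep
        by_cases hstrip : (PySem.Str.strip p.2 != "") = true
        · rw [if_pos hstrip]
          cases hr : r p.1 with
          | none => rfl
          | some x =>
            by_cases hpk : p.1 = k
            · rw [hpk] at hr; rw [hrk] at hr
              injection hr with hx; subst hx
              simp
            · have := hgt p.1 x hpk hr
              simp [show ¬ (x < s) by omega]
        · rw [if_neg hstrip]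
      · by_cases hpkv : p = (k, v)
        · -- the minimum element itself: the step installs (s, v)
          subst hpkv
          left
          unfold pvGStep
          rw [if_pos hpass, hrk]
          rcases hhigh with hnone | ⟨b, hb, hlt⟩
          · rw [hnone]
          · rw [hb]; simp [hlt]
        · -- not the minimum: acc stays none-or-high and (k,v) is still ahead
          have hpk : p.1 ≠ k := by
            intro hpk
            exact hpkv (by
              have := huniq p (List.mem_cons_self) hpk
              cases p; simp_all)
          have hmem' : (k, v) ∈ l := by
            rcases List.mem_cons.mp hmem with h | h
            · exact absurd h.symm hpkv
            · exact h
          right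
          refine ⟨hmem', ?_⟩
          unfold pvGStep
          by_cases hstrip : (PySem.Str.strip p.2 != "") = true
          · rw [if_pos hstrip]
            cases hr : r p.1 with
            | none => exact hhigh
            | some x =>
              have hsx := hgt p.1 x hpk hr
              right
              rcases hhigh with hnone | ⟨b, hb, hlt⟩
              · rw [hnone]; exact ⟨(x, p.2), rfl, hsx⟩
              · rw [hb]
                by_cases hxb : x < b.1
                · exact ⟨(x, p.2), by simp [hxb], hsx⟩
                · exact ⟨b, by simp [hxb], hlt⟩
          · rw [if_neg hstrip]; exact hhigh

-- main loop correspondence: B's single pass with ranks s, s+1, … over ks computes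
-- exactly A's first-hit scan of ks
lemma pvLoop_eq (ks : List String) (iss : List (String × String))
    (hnd : (iss.map Prod.fst).Nodup) (s : Int) :
    (iss.foldl (pvGStep (pvRk ks s)) none).map (fun b => PySem.Str.strip b.2)
      = pvALoop iss ks := by
  induction ks generalizing s with
  | nil =>
    have hnone : iss.foldl (pvGStep (pvRk [] s)) none = none := by
      have : ∀ (l : List (String × String)) (acc : Option (Int × String)),
          l.foldl (pvGStep (pvRk [] s)) acc = acc := by
        intro l
        induction l with
        | nil => intro acc; rfl
        | cons p l ih =>
          intro acc
          rw [List.foldl_cons, pvGStep_norank _ _ _ (by simp [pvRk, PySem.List.index?]), ih]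
      exact this iss none
    rw [hnone]; rfl
  | cons k0 ks ih =>
    have hkeys : (PySem.Dict.mk iss).keys.Nodup := by
      rw [PySem.Dict.keys_mk]; exact hnd
    cases hget : PySem.Dict.get? (PySem.Dict.mk iss) k0 with
    | none =>
      -- k0 is not a key of iss: every rank the pass sees comes from ks shifted by one
      have hnok : ∀ p ∈ iss, p.1 ≠ k0 := by
        intro p hp hpk
        have : k0 ∈ (PySem.Dict.mk iss).keys := by
          rw [PySem.Dict.keys_mk]
          exact hpk ▸ List.mem_map_of_mem hp
        exact (PySem.Dict.get?_eq_none_iff_not_mem_keys _ _).mp hget this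
      rw [PySem.List.foldl_congr_mem iss (pvGStep (pvRk (k0 :: ks) s))
            (pvGStep (pvRk ks (s + 1))) none
            (fun acc p hp =>
              pvGStep_congr _ _ _ _ (pvRk_cons_ne _ _ _ _ (fun h => hnok p hp h.symm)))]
      rw [pvALoop_cons_none iss k0 ks hget]
      exact ih (s + 1)
    | some v =>
      have hmem : (k0, v) ∈ iss :=
        (PySem.Dict.get?_eq_some_iff_mem_items _ _ _ hkeys).mp hget
      have huniq : ∀ p ∈ iss, p.1 = k0 → p.2 = v := by
        intro p hp hpk
        have h1 : PySem.Dict.get? (PySem.Dict.mk iss) p.1 = some p.2 :=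
          (PySem.Dict.get?_eq_some_iff_mem_items _ _ _ hkeys).mpr (by cases p; exact hp)
        rw [hpk, hget] at h1
        injection h1 with h1; exact h1.symm
      rw [pvALoop_cons_some iss k0 ks v hget, pvPass_eq]
      by_cases hpass : (PySem.Str.strip v != "") = true
      · rw [if_pos hpass]
        have := pvReach (pvRk (k0 :: ks) s) k0 v s
          (by
            unfold pvRk
            rw [PySem.List.index?_cons_self]
            simp)
          (by
            intro k' x hk' hr
            unfold pvRk at hr
            rw [PySem.List.index?_cons_of_ne ks (fun h => hk' h.symm)] at hr
            cases hi : PySem.List.index? ks k' with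
            | none => rw [hi] at hr; simp [Option.map] at hr
            | some i =>
              rw [hi] at hr; simp [Option.map] at hr
              omega)
          hpass iss none huniq (Or.inr ⟨hmem, Or.inl rfl⟩)
        rw [this]; rfl
      · rw [if_neg hpass]
        -- the only item keyed k0 fails the strip test, so the pass never ranks it
        rw [PySem.List.foldl_congr_mem iss (pvGStep (pvRk (k0 :: ks) s))
              (pvGStep (pvRk ks (s + 1))) none
              (fun acc p hp => by
                by_cases hpk : p.1 = k0
                · have hpv := huniq p hp hpk
                  have hstrip : PySem.Str.strip p.2 = "" := by
                    rw [hpv]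
                    simpa using hpass
                  rw [pvGStep_skip _ _ _ hstrip, pvGStep_skip _ _ _ hstrip]
                · exact pvGStep_congr _ _ _ _ (pvRk_cons_ne _ _ _ _ (fun h => hpk h.symm)))]
        exact ih (s + 1)

-- ===== VERDICT (by name: the statement is the Claim_ definition above) =====
theorem extract_issue_text_py_spec : Claim_equal_extract_issue_text_py := by
  intro iss _ hpre
  show extract_issue_text_py iss = extract_issue_text_py_alt iss
  unfold extract_issue_text_py extract_issue_text_py_alt
  rw [pvBStep_split,
      PySem.List.foldl_congr_mem iss (pvGStep (fun k => PySem.Dict.get? pvRank k))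
        (pvGStep (pvRk pvKEYS 0)) none
        (fun acc p _ => pvGStep_congr _ _ _ _ (pvRank_get p.1)),
      ← pvLoop_eq pvKEYS iss hpre 0]
  cases iss.foldl (pvGStep (pvRk pvKEYS 0)) none with
  | none => rfl
  | some b => rfl
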